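-- pv_equiv track=rewrite | github.com/aniketmondal1210/GFG-Chronicles | Difficulty: Basic/Fake Profile/fake_profile.py | solve
-- ===== SOURCE A (Python) =====
-- def solve(a):
--     # code here
--     b = list(set(a))
--     vowels = ['a','e','i','o','u']
--     count = 0
--     for i in b:
--         if i not in vowels:
--             count += 1
--     return "HE!" if count % 2 != 0 else "SHE!"
-- ===== SOURCE B (Python) =====
-- def solve(a):
--     s = set(a)
--     vowels_present = sum(v in s for v in 'aeiou')
--     count = len(s) - vowels_present
--     return "HE!" if count % 2 else "SHE!"
-- ===== Notes on version B (the rewrite author's own statement) =====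
-- stated objective: simpler
-- what changed: B loops over the five vowels testing membership in set(a) and derives the consonant count as len(set(a)) minus vowels present, instead of scanning every distinct character and classifying it.
import Mathlib
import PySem

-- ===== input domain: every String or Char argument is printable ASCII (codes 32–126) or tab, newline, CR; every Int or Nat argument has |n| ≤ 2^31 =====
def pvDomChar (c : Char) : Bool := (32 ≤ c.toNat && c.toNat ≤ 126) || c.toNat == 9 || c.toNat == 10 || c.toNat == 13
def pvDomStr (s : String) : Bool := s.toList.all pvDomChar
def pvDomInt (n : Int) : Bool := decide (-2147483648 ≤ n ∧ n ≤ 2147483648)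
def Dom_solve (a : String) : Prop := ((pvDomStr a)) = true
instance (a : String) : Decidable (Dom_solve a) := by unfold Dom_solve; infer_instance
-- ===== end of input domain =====

-- B derives the consonant count by subtracting the number of vowels present (a 5-membership scan) from len(set(a)), instead of classifying every distinct character; objective: simpler.

-- ===== PORT A =====
def solve (a : String) : String :=
  let b := PySem.Set.ofList a.toList
  let vowels : List Char := ['a','e','i','o','u']
  let count : Int := b.foldl (fun c i => if i ∉ vowels then c + 1 else c) 0
  if PySem.Int.mod count 2 ≠ 0 then "HE!" else "SHE!"

-- ===== PORT B =====
def solve_alt (a : String) : String :=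
  let s := PySem.Set.ofList a.toList
  let vowelsPresent : Int := ("aeiou".toList.map (fun v => if v ∈ s then (1 : Int) else 0)).sum
  let count : Int := (s.length : Int) - vowelsPresent
  if PySem.Int.mod count 2 ≠ 0 then "HE!" else "SHE!"

-- ===== PRECONDITION & SPEC =====
def Spec_solve (a : String) (out : String) : Prop := out = solve_alt a
instance (a : String) (out : String) : Decidable (Spec_solve a out) := by unfold Spec_solve; infer_instance

-- ===== CLAIM (what is proved, stated in full; the proofs are below) =====
def Claim_equal_solve : Prop := ∀ (a : String), Dom_solve a → Spec_solve a (solve a)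

-- ===== LEMMAS AND PROOFS =====

-- counting the members of `vs` that lie in `l` equals counting the members of `l` that lie in `vs`, when both are Nodup
theorem countP_mem_comm {l vs : List Char} (hl : l.Nodup) (hv : vs.Nodup) :
    vs.countP (fun v => l.contains v) = l.countP (fun x => vs.contains x) := by
  rw [List.countP_eq_length_filter, List.countP_eq_length_filter]
  apply List.Perm.length_eq
  apply List.perm_of_nodup_nodup_toFinset_eq (hv.filter _) (hl.filter _)
  ext x
  simp [and_comm]

theorem count_eq (a : String) :
    (PySem.Set.ofList a.toList).foldl
        (fun c i => if i ∉ (['a','e','i','o','u'] : List Char) then c + 1 else c) (0 : Int)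
      = ((PySem.Set.ofList a.toList).length : Int)
        - (("aeiou".toList.map (fun v => if v ∈ PySem.Set.ofList a.toList then (1 : Int) else 0)).sum) := by
  set s : List Char := PySem.Set.ofList a.toList with hs
  set vowels : List Char := ['a','e','i','o','u'] with hv
  have hA : s.foldl (fun c i => if i ∉ vowels then c + 1 else c) (0 : Int)
      = ((s.countP (fun i => !vowels.contains i) : Nat) : Int) := by
    have hfun : (fun (c : Int) i => if i ∉ vowels then c + 1 else c)
        = (fun (c : Int) i => if (!vowels.contains i) = true then c + 1 else c) := by
      funext c i; by_cases h : i ∈ vowels <;> simp [h]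
    rw [hfun, PySem.List.foldl_count_if]; simp
  have hB : ("aeiou".toList.map (fun v => if v ∈ s then (1 : Int) else 0)).sum
      = (("aeiou".toList.countP (fun v => s.contains v) : Nat) : Int) := by
    have hfun : (fun (v : Char) => if v ∈ s then (1 : Int) else 0)
        = (fun v => if s.contains v = true then (1 : Int) else 0) := by
      funext v; by_cases h : v ∈ s <;> simp [h]
    rw [hfun, PySem.List.sum_map_ite_one_zero]
  have hnodup : s.Nodup := hs ▸ PySem.Set.nodup_ofList a.toList
  have hvn : ("aeiou".toList).Nodup := by decide
  have haeiou : "aeiou".toList = vowels := by decide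
  have hcomm : "aeiou".toList.countP (fun v => s.contains v)
      = s.countP (fun x => vowels.contains x) := by
    rw [countP_mem_comm hnodup hvn, haeiou]
  have hsplit : s.countP (fun x => vowels.contains x)
      + s.countP (fun i => !vowels.contains i) = s.length := by
    have h := List.length_eq_countP_add_countP (p := fun x => vowels.contains x) (l := s)
    simpa using h.symm
  rw [hA, hB, hcomm]
  omega

-- ===== VERDICT (by name: the statement is the Claim_ definition above) =====
theorem solve_spec : Claim_equal_solve := by
  intro a _
  unfold Spec_solve solve solve_alt
  simp only [count_eq a]
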